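-- pv_equiv track=rewrite | github.com/dayton3375/Programming_Language_Design | Lab3/Lab3.py | getMonthlyCases
-- ===== SOURCE A (Python) =====
-- def getMonthlyCases(data):
--      monthlyCases = {}
--
--      for county in data:
--           countyData = data[county]
--
--           for month in countyData:
--                if month not in monthlyCases:
--                     monthlyCases.update({month : {}})
--                     monthlyCases[month].update({county : 0})
--                if county not in monthlyCases[month]:
--                     monthlyCases[month].update({county : 0})
--
--                monthlyCases[month][county] += countyData[month] ## add cases to month
--
--      return monthlyCases
-- ===== SOURCE B (Python) =====
-- def getMonthlyCases(data):
--     # index-first decomposition: collect months in first-encounter order,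
--     # then build each month's row by a filtered scan over the counties
--     months = {}
--     for countyData in data.values():
--         months.update(dict.fromkeys(countyData))
--     return {m: {c: cd[m] for c, cd in data.items() if m in cd} for m in months}
-- ===== Notes on version B (the rewrite author's own statement) =====
-- stated objective: alternative
-- what changed: A builds the nested month->county dict in one opportunistic pass, growing and patching inner dicts with guarded inserts and +=; B first collects the distinct months in first-encounter order, then builds each month's row by a filtered scan over the counties in data order. B trades speed on sparse inputs for the plainer index-first structure.
import Mathlib
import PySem

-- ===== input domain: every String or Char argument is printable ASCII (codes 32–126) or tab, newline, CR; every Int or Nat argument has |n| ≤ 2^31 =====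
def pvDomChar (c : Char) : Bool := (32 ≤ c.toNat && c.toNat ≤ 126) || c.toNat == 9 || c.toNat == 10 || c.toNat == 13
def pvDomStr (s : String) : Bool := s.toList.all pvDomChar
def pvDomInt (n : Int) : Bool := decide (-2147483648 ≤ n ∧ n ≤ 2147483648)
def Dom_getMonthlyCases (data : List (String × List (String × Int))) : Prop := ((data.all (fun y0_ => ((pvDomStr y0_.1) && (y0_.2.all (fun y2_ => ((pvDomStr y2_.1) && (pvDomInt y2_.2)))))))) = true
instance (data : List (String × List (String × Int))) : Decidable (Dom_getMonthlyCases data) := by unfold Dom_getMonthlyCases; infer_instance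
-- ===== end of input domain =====

-- B replaces A's single opportunistic pass (grow-and-patch nested dict) by an index-first
-- decomposition: collect the distinct months first, then build each month's row by a
-- filtered scan over the counties; objective: alternative (plainer structure, not faster).

-- ===== PORT A =====
def getMonthlyCases (data : List (String × List (String × Int))) : List (String × List (String × Int)) :=
  let mc : PySem.Dict String (PySem.Dict String Int) :=
    data.foldl (fun mc cp =>
      cp.2.foldl (fun mc mp =>
        let mc := if mc.contains mp.1 then mc
                  else mc.insert mp.1 (PySem.Dict.empty.insert cp.1 0)
        let inner := mc.getD mp.1 PySem.Dict.empty
        let mc := if inner.contains cp.1 then mc else mc.insert mp.1 (inner.insert cp.1 0)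
        let inner := mc.getD mp.1 PySem.Dict.empty
        mc.insert mp.1 (inner.insert cp.1 (inner.getD cp.1 0 + mp.2))) mc) PySem.Dict.empty
  mc.items.map (fun p => (p.1, p.2.items))

-- ===== PORT B =====
def getMonthlyCases_alt (data : List (String × List (String × Int))) : List (String × List (String × Int)) :=
  let months : PySem.Set String :=
    data.foldl (fun ms cp => PySem.Set.update ms (cp.2.map (·.1))) PySem.Set.empty
  months.map (fun m =>
    (m, data.filterMap (fun cp => ((PySem.Dict.mk cp.2).get? m).map (fun v => (cp.1, v)))))

-- ===== PRECONDITION & SPEC =====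
-- Pre_ excludes association lists with duplicate county keys or duplicate month keys inside
-- a county: such lists do not correspond to any Python dict input (a dict collapses the
-- duplicates before A ever sees them), so behaviour there is an artefact of the list encoding.
def Pre_getMonthlyCases (data : List (String × List (String × Int))) : Prop :=
  (data.map (·.1)).Nodup ∧ ∀ p ∈ data, (p.2.map (·.1)).Nodup
instance (data : List (String × List (String × Int))) : Decidable (Pre_getMonthlyCases data) := by
  unfold Pre_getMonthlyCases; infer_instance

def pvWitness_getMonthlyCases : (List (String × List (String × Int))) :=
  [("adams", [("jan", 3), ("feb", 4)]), ("boone", [("jan", 5)])]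

def Spec_getMonthlyCases (data : List (String × List (String × Int))) (out : List (String × List (String × Int))) : Prop := out = getMonthlyCases_alt data
instance (data : List (String × List (String × Int))) (out : List (String × List (String × Int))) : Decidable (Spec_getMonthlyCases data out) := by unfold Spec_getMonthlyCases; infer_instance

-- ===== CLAIM (what is proved, stated in full; the proofs are below) =====
def Claim_equal_getMonthlyCases : Prop := ∀ (data : List (String × List (String × Int))), Dom_getMonthlyCases data → Pre_getMonthlyCases data → Spec_getMonthlyCases data (getMonthlyCases data)

-- ===== LEMMAS AND PROOFS =====

-- A's inner-loop body, named for the proofs (definitionally the fold body of port A)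
def aInner (cname : String) (mc : PySem.Dict String (PySem.Dict String Int)) (mp : String × Int) :
    PySem.Dict String (PySem.Dict String Int) :=
  let mc := if mc.contains mp.1 then mc
            else mc.insert mp.1 (PySem.Dict.empty.insert cname 0)
  let inner := mc.getD mp.1 PySem.Dict.empty
  let mc := if inner.contains cname then mc else mc.insert mp.1 (inner.insert cname 0)
  let inner := mc.getD mp.1 PySem.Dict.empty
  mc.insert mp.1 (inner.insert cname (inner.getD cname 0 + mp.2))

-- B's row for month m: the counties containing m, in data order
def rowOf (data : List (String × List (String × Int))) (m : String) : List (String × Int) :=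
  data.filterMap (fun cp => ((PySem.Dict.mk cp.2).get? m).map (fun v => (cp.1, v)))

-- the contribution of one county (cname, cd) to month m's row
def optFor (cname : String) (cd : List (String × Int)) (m : String) : List (String × Int) :=
  match (PySem.Dict.mk cd).get? m with
  | some v => [(cname, v)]
  | none => []

theorem inner_fold (cname : String) (cd : List (String × Int)) :
    ∀ (ms : List String) (g : String → List (String × Int))
      (s : PySem.Dict String (PySem.Dict String Int)),
      ms.Nodup → (cd.map (·.1)).Nodup →
      (∀ m ∈ cd.map (·.1), cname ∉ (g m).map (·.1)) →
      (∀ m, m ∉ ms → g m = []) →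
      s.items = ms.map (fun m => (m, PySem.Dict.mk (g m))) →
      (cd.foldl (aInner cname) s).items
        = (PySem.Set.update ms (cd.map (·.1))).map
            (fun m => (m, PySem.Dict.mk (g m ++ optFor cname cd m))) := by
  induction cd with
  | nil =>
    intro ms g s hms _ _ _ hs
    have hnone : ∀ m, optFor cname [] m = [] := by intro m; rfl
    simpa [hnone] using hs
  | cons mp rest ih =>
    intro ms g s hms hnd hfree hg0 hs
    simp only [List.map_cons, List.nodup_cons] at hnd
    have hmonth_rest : mp.1 ∉ rest.map (·.1) := hnd.1
    have hrestnd : (rest.map (·.1)).Nodup := hnd.2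
    have hsk : s.keys = ms := by
      simp only [PySem.Dict.keys, hs, List.map_map]
      have hid : ((fun x : String × PySem.Dict String Int => x.1) ∘
          fun m => (m, PySem.Dict.mk (g m))) = id := rfl
      rw [hid, List.map_id]
    have hknd : s.keys.Nodup := by rw [hsk]; exact hms
    have hoptrest : optFor cname rest mp.1 = [] := by
      unfold optFor
      have h0 : (PySem.Dict.mk rest).get? mp.1 = none := by
        rw [PySem.Dict.get?_eq_none_iff_not_mem_keys]
        simpa [PySem.Dict.keys] using hmonth_rest
      simp [h0]
    have hoptcons : ∀ m, optFor cname (mp :: rest) m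
        = if mp.1 = m then [(cname, mp.2)] else optFor cname rest m := by
      intro m
      unfold optFor
      rw [PySem.Dict.get?_mk_cons]
      by_cases hx : mp.1 = m <;> simp [hx]
    by_cases hmem : mp.1 ∈ ms
    · -- month already present: the row of mp.1 gains (cname, mp.2) at the end
      have hcont1 : s.contains mp.1 = true := by
        rw [PySem.Dict.contains_eq_decide_mem_keys, hsk]; simpa using hmem
      have hmem_items : (mp.1, PySem.Dict.mk (g mp.1)) ∈ s.items := by
        rw [hs]
        exact List.mem_map_of_mem hmem
      have hgetD : s.getD mp.1 PySem.Dict.empty = PySem.Dict.mk (g mp.1) :=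
        PySem.Dict.getD_of_mem_items s hmem_items hknd PySem.Dict.empty
      have hcfree : (PySem.Dict.mk (g mp.1)).contains cname = false := by
        rw [PySem.Dict.contains_eq_decide_mem_keys]
        simpa [PySem.Dict.keys] using hfree mp.1 (by simp)
      have hstep : aInner cname s mp
          = s.insert mp.1 ((PySem.Dict.mk (g mp.1)).insert cname mp.2) := by
        unfold aInner
        simp [hcont1, hgetD, hcfree, PySem.Dict.getD_insert_self,
          PySem.Dict.insert_insert_self]
      have hinner : (PySem.Dict.mk (g mp.1)).insert cname mp.2
          = PySem.Dict.mk (g mp.1 ++ [(cname, mp.2)]) := by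
        apply PySem.Dict.ext
        rw [PySem.Dict.items_insert_of_not_contains _ _ hcfree]
      have hitems : (aInner cname s mp).items
          = ms.map (fun m => (m, PySem.Dict.mk
              (if m = mp.1 then g mp.1 ++ [(cname, mp.2)] else g m))) := by
        rw [hstep, PySem.Dict.items_insert_of_contains s _ hcont1, hs, List.map_map]
        apply List.map_congr_left
        intro m _
        by_cases hx : m = mp.1 <;> simp [hx, hinner]
      have hres := ih ms (fun m => if m = mp.1 then g mp.1 ++ [(cname, mp.2)] else g m)
        (aInner cname s mp) hms hrestnd
        (by
          intro m hm
          have hne : m ≠ mp.1 := by rintro rfl; exact hmonth_rest hm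
          simpa [hne] using hfree m (by simp [hm]))
        (by
          intro m hm
          have hne : m ≠ mp.1 := by rintro rfl; exact hm hmem
          simpa [hne] using hg0 m hm)
        hitems
      simp only [List.foldl_cons]
      rw [hres, List.map_cons, PySem.Set.update_cons, PySem.Set.add_of_mem hmem]
      apply List.map_congr_left
      intro m _
      by_cases hx : m = mp.1
      · subst hx
        simp [hoptcons, hoptrest]
      · simp [hoptcons, hx, Ne.symm hx]
    · -- fresh month: a new row [(cname, mp.2)] is appended
      have hcont1 : s.contains mp.1 = false := by
        rw [PySem.Dict.contains_eq_decide_mem_keys, hsk]; simpa using hmem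
      have hstep : aInner cname s mp
          = s.insert mp.1 (PySem.Dict.empty.insert cname mp.2) := by
        unfold aInner
        simp [hcont1, PySem.Dict.getD_insert_self, PySem.Dict.contains_insert_self,
          PySem.Dict.insert_insert_self]
      have hinner : PySem.Dict.empty.insert cname mp.2
          = PySem.Dict.mk [(cname, mp.2)] := by
        apply PySem.Dict.ext
        rw [PySem.Dict.items_insert_of_not_contains _ _ (PySem.Dict.contains_empty cname)]
        rfl
      have hitems : (aInner cname s mp).items
          = (ms ++ [mp.1]).map (fun m => (m, PySem.Dict.mk
              (if m = mp.1 then [(cname, mp.2)] else g m))) := by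
        rw [hstep, PySem.Dict.items_insert_of_not_contains s _ hcont1, hs,
          List.map_append]
        congr 1
        · apply List.map_congr_left
          intro m hm
          have hne : m ≠ mp.1 := by rintro rfl; exact hmem hm
          simp [hne]
        · simp [hinner]
      have hres := ih (ms ++ [mp.1]) (fun m => if m = mp.1 then [(cname, mp.2)] else g m)
        (aInner cname s mp)
        (List.Nodup.append hms (List.nodup_singleton _) (by simpa using hmem))
        hrestnd
        (by
          intro m hm
          have hne : m ≠ mp.1 := by rintro rfl; exact hmonth_rest hm
          simpa [hne] using hfree m (by simp [hm]))
        (by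
          intro m hm
          simp only [List.mem_append, List.mem_singleton] at hm
          push Not at hm
          simpa [hm.2] using hg0 m hm.1)
        hitems
      simp only [List.foldl_cons]
      rw [hres, List.map_cons, PySem.Set.update_cons, PySem.Set.add_of_not_mem hmem]
      apply List.map_congr_left
      intro m _
      by_cases hx : m = mp.1
      · subst hx
        simp [hoptcons, hoptrest, hg0 _ hmem]
      · simp [hoptcons, hx, Ne.symm hx]

theorem outer_fold (P : List (String × List (String × Int))) :
    ∀ (ms : List String) (g : String → List (String × Int))
      (s : PySem.Dict String (PySem.Dict String Int)),
      ms.Nodup → (P.map (·.1)).Nodup → (∀ p ∈ P, (p.2.map (·.1)).Nodup) →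
      (∀ m, ∀ c ∈ (g m).map (·.1), c ∉ P.map (·.1)) →
      (∀ m, m ∉ ms → g m = []) →
      s.items = ms.map (fun m => (m, PySem.Dict.mk (g m))) →
      (P.foldl (fun mc cp => cp.2.foldl (aInner cp.1) mc) s).items
        = (P.foldl (fun ms cp => PySem.Set.update ms (cp.2.map (·.1))) ms).map
            (fun m => (m, PySem.Dict.mk (g m ++ rowOf P m))) := by
  induction P with
  | nil =>
    intro ms g s hms _ _ _ _ hs
    simpa [rowOf] using hs
  | cons cp rest ih =>
    intro ms g s hms hP hPin hfree hg0 hs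
    have hcdnd : (cp.2.map (·.1)).Nodup := hPin cp (by simp)
    have hcname : cp.1 ∉ rest.map (·.1) := by
      simp only [List.map_cons, List.nodup_cons] at hP; exact hP.1
    have hstep := inner_fold cp.1 cp.2 ms g s hms hcdnd
      (by intro m _ hc; exact hfree m cp.1 hc (by simp)) hg0 hs
    have hres := ih (PySem.Set.update ms (cp.2.map (·.1)))
      (fun m => g m ++ optFor cp.1 cp.2 m)
      (cp.2.foldl (aInner cp.1) s)
      (PySem.Set.nodup_update _ _ hms)
      (by simp only [List.map_cons, List.nodup_cons] at hP; exact hP.2)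
      (by intro p hp; exact hPin p (by simp [hp]))
      (by
        intro m c hc hcr
        simp only [List.map_append, List.mem_append] at hc
        rcases hc with hc | hc
        · exact hfree m c hc (by simp [hcr])
        · have : c = cp.1 := by
            unfold optFor at hc
            cases h : (PySem.Dict.mk cp.2).get? m with
            | none => simp [h] at hc
            | some v => simp [h] at hc; exact hc
          exact hcname (this ▸ hcr))
      (by
        intro m hm
        rw [PySem.Set.mem_update] at hm
        push Not at hm
        have h1 : g m = [] := hg0 m hm.1
        have h2 : optFor cp.1 cp.2 m = [] := by
          unfold optFor
          have : (PySem.Dict.mk cp.2).get? m = none := by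
            rw [PySem.Dict.get?_eq_none_iff_not_mem_keys]
            simpa [PySem.Dict.keys] using hm.2
          simp [this]
        simp [h1, h2])
      hstep
    simp only [List.foldl_cons]
    rw [hres]
    apply List.map_congr_left
    intro m _
    have hrow : rowOf (cp :: rest) m = optFor cp.1 cp.2 m ++ rowOf rest m := by
      unfold rowOf optFor
      cases h : (PySem.Dict.mk cp.2).get? m <;> simp [h]
    rw [hrow, List.append_assoc]

-- ===== VERDICT (by name: the statement is the Claim_ definition above) =====
theorem getMonthlyCases_spec : Claim_equal_getMonthlyCases := by
  intro data _ hpre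
  unfold Spec_getMonthlyCases
  have h := outer_fold data [] (fun _ => []) PySem.Dict.empty List.nodup_nil hpre.1 hpre.2
    (by intro m c hc; simp at hc) (by intro m _; rfl) rfl
  show getMonthlyCases data = getMonthlyCases_alt data
  unfold getMonthlyCases getMonthlyCases_alt
  show (data.foldl (fun mc cp => cp.2.foldl (aInner cp.1) mc) PySem.Dict.empty).items.map
        (fun p => (p.1, p.2.items)) = _
  rw [h]
  simp [rowOf, PySem.Set.empty]
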